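-- pv_equiv track=rewrite | github.com/Sestren413/ReinforcementLearningCheckers | 64/Board.py | cstring
-- ===== SOURCE A (Python) =====
-- def cstring(pieces):
--     string = ''
--     for idx,p in enumerate(pieces):
--         if idx%8 < 4:
--             string += '◼'
--         if p == 0:
--             string += '◻'
--         elif p == 1:
--             string += '\u26C0'
--         elif p == 2:
--             string += '\u26C1'
--         elif p == 3:
--             string += '\u26C2'
--         elif p == 4:
--             string += '\u26C3'
--         else:
--             string += '?'
--         if idx%8 > 3:
--             string += '◼'
--         if idx%4 == 3:
--             string += '\n'
--     return string
-- ===== SOURCE B (Python) =====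
-- def cstring(pieces):
--     GLYPHS = ['\u25FB', '\u26C0', '\u26C1', '\u26C2', '\u26C3']
--
--     def cell(p):
--         return GLYPHS[p] if 0 <= p <= 4 else '?'
--
--     out = []
--     row = 0
--     for start in range(0, len(pieces), 4):
--         chunk = pieces[start:start + 4]
--         if row % 2 == 0:
--             cells = ['\u25FC' + cell(p) for p in chunk]
--         else:
--             cells = [cell(p) + '\u25FC' for p in chunk]
--         out.append(''.join(cells))
--         if len(chunk) == 4:
--             out.append('\n')
--         row += 1
--     return ''.join(out)
-- ===== Notes on version B (the rewrite author's own statement) =====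
-- stated objective: alternative
-- what changed: B builds the board row by row: it chunks the pieces into rows of 4, uses the row parity once per row to place the black square before or after every glyph in that row, joins the cells and appends a newline only for complete rows, instead of A's single per-index loop re-deriving side/newline from idx%8 and idx%4 at each piece.
import Mathlib
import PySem

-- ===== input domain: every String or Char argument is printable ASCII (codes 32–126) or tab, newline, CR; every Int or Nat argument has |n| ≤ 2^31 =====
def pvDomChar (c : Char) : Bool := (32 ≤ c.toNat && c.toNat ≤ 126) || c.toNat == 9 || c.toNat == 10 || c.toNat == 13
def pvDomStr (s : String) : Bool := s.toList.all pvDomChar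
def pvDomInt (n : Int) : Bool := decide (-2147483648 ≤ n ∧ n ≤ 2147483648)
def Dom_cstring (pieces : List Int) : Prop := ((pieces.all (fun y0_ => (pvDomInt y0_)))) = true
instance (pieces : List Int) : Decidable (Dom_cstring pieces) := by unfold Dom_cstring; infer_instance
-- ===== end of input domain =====

-- B builds the board row by row (chunks of 4, side chosen once per row) instead of A's per-piece loop.

-- ===== PORT A =====
-- glyph if/elif chain of A, in the same branch order
def cellA (p : Int) : String :=
  if p = 0 then "◻"
  else if p = 1 then "⛀"
  else if p = 2 then "⛁"
  else if p = 3 then "⛂"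
  else if p = 4 then "⛃"
  else "?"

-- the for loop of A: one piece at a time, carrying the running index and the string accumulator
def cstringGo : List Int → Nat → String → String
  | [], _, acc => acc
  | p :: rest, idx, acc =>
      cstringGo rest (idx + 1)
        ((((acc ++ (if idx % 8 < 4 then "◼" else ""))
            ++ cellA p)
            ++ (if idx % 8 > 3 then "◼" else ""))
            ++ (if idx % 4 = 3 then "\n" else ""))

def cstring (pieces : List Int) : String := cstringGo pieces 0 ""

-- ===== PORT B =====
-- B's GLYPHS[p] if 0 <= p <= 4 else '?'
def cellB (p : Int) : String :=
  if 0 ≤ p ∧ p ≤ 4 then ["◻", "⛀", "⛁", "⛂", "⛃"].getD p.toNat "?" else "?"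

-- B's loop over row chunks of 4, carrying the row number
def cstringAltGo : List Int → Nat → String
  | [], _ => ""
  | p :: rest, row =>
      let chunk := p :: rest.take 3
      let cells := if row % 2 = 0 then chunk.map (fun q => "◼" ++ cellB q)
                   else chunk.map (fun q => cellB q ++ "◼")
      (String.join cells ++ (if chunk.length = 4 then "\n" else ""))
        ++ cstringAltGo (rest.drop 3) (row + 1)
  termination_by l _ => l.length
  decreasing_by simp

def cstring_alt (pieces : List Int) : String := cstringAltGo pieces 0

-- ===== PRECONDITION & SPEC =====
def Spec_cstring (pieces : List Int) (out : String) : Prop := out = cstring_alt pieces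
instance (pieces : List Int) (out : String) : Decidable (Spec_cstring pieces out) := by unfold Spec_cstring; infer_instance

-- ===== CLAIM (what is proved, stated in full; the proofs are below) =====
def Claim_equal_cstring : Prop := ∀ (pieces : List Int), Dom_cstring pieces → Spec_cstring pieces (cstring pieces)

-- ===== LEMMAS AND PROOFS =====

theorem altGo_nil (r : Nat) : cstringAltGo [] r = "" := by
  rw [cstringAltGo]

theorem altGo_cons (p : Int) (rest : List Int) (row : Nat) :
    cstringAltGo (p :: rest) row =
      (String.join ((if row % 2 = 0 then (p :: rest.take 3).map (fun q => "◼" ++ cellB q)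
                     else (p :: rest.take 3).map (fun q => cellB q ++ "◼")))
        ++ (if (p :: rest.take 3).length = 4 then "\n" else ""))
        ++ cstringAltGo (rest.drop 3) (row + 1) := by
  rw [cstringAltGo]

theorem cell_eq (p : Int) : cellA p = cellB p := by
  unfold cellA cellB
  by_cases h0 : p = 0 <;> by_cases h1 : p = 1 <;> by_cases h2 : p = 2 <;>
    by_cases h3 : p = 3 <;> by_cases h4 : p = 4 <;> simp_all <;>
    (intro ha hb; omega)

theorem go_eq : ∀ (n : Nat) (l : List Int), l.length ≤ n → ∀ (r : Nat) (acc : String),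
    cstringGo l (4 * r) acc = acc ++ cstringAltGo l r := by
  intro n
  induction n with
  | zero =>
      intro l hl r acc
      have : l = [] := List.eq_nil_of_length_eq_zero (Nat.le_zero.mp hl)
      subst this
      simp [cstringGo, altGo_nil]
  | succ n ih =>
      intro l hl r acc
      have e0 : (4 * r % 8 < 4) = (r % 2 = 0) := by
        apply propext; constructor <;> intro h <;> omega
      have e1 : (4 * r % 8 > 3) = ¬(r % 2 = 0) := by
        apply propext; constructor <;> intro h <;> omega
      have f0 : ((4 * r + 1) % 8 < 4) = (r % 2 = 0) := by
        apply propext; constructor <;> intro h <;> omega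
      have f1 : ((4 * r + 1) % 8 > 3) = ¬(r % 2 = 0) := by
        apply propext; constructor <;> intro h <;> omega
      have g0 : ((4 * r + 1 + 1) % 8 < 4) = (r % 2 = 0) := by
        apply propext; constructor <;> intro h <;> omega
      have g1 : ((4 * r + 1 + 1) % 8 > 3) = ¬(r % 2 = 0) := by
        apply propext; constructor <;> intro h <;> omega
      have k0 : ((4 * r + 1 + 1 + 1) % 8 < 4) = (r % 2 = 0) := by
        apply propext; constructor <;> intro h <;> omega
      have k1 : ((4 * r + 1 + 1 + 1) % 8 > 3) = ¬(r % 2 = 0) := by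
        apply propext; constructor <;> intro h <;> omega
      have m0 : ¬ (4 * r % 4 = 3) := by omega
      have m1 : ¬ ((4 * r + 1) % 4 = 3) := by omega
      have m2 : ¬ ((4 * r + 1 + 1) % 4 = 3) := by omega
      have m3 : (4 * r + 1 + 1 + 1) % 4 = 3 := by omega
      match l with
      | [] => simp [cstringGo, altGo_nil]
      | [a] =>
          by_cases hr : r % 2 = 0 <;>
            simp [cstringGo, altGo_cons, altGo_nil, e0, e1, m0, hr, cell_eq, String.join,
              String.append_assoc, String.append_empty, String.empty_append]
      | [a, b] =>
          by_cases hr : r % 2 = 0 <;>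
            simp [cstringGo, altGo_cons, altGo_nil, e0, e1, f0, f1, m0, m1, hr, cell_eq,
              String.join, String.append_assoc, String.append_empty, String.empty_append]
      | [a, b, c] =>
          by_cases hr : r % 2 = 0 <;>
            simp [cstringGo, altGo_cons, altGo_nil, e0, e1, f0, f1, g0, g1, m0, m1, m2, hr,
              cell_eq, String.join, String.append_assoc, String.append_empty, String.empty_append]
      | a :: b :: c :: d :: t =>
          have ht : t.length ≤ n := by simp at hl; omega
          have ihr := ih t ht (r + 1)
          by_cases hr : r % 2 = 0 <;>
            (simp [cstringGo, altGo_cons, e0, e1, f0, f1, g0, g1, k0, k1, m0, m1, m2, m3, hr,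
               cell_eq, String.join, String.append_assoc, String.append_empty,
               String.empty_append]
             rw [show 4 * r + 1 + 1 + 1 + 1 = 4 * (r + 1) from by ring, ihr]
             simp [String.append_assoc])

-- ===== VERDICT (by name: the statement is the Claim_ definition above) =====
theorem cstring_spec : Claim_equal_cstring := by
  intro pieces _
  unfold Spec_cstring cstring cstring_alt
  simpa using go_eq pieces.length pieces (le_refl _) 0 ""
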